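-- pv_equiv track=rewrite | github.com/Darwinky25/DARWIN-with-ALLA-engine | alla_visual_teacher.py | _apply_move_down_rule
-- ===== SOURCE A (Python) =====
-- from typing import List, Dict, Any, Optional, Tuple
--
-- def _apply_move_down_rule(grid: List[List[int]]) -> List[List[int]]:
--     """Apply a 'move down' rule to the grid."""
--     result = [row[:] for row in grid]
--
--     # Find blue objects (color 1) and move them down
--     for col in range(len(result[0])):
--         # Find blue objects in this column
--         blue_positions = []
--         for row in range(len(result)):
--             if result[row][col] == 1:
--                 blue_positions.append(row)
--
--         # Clear blue objects
--         for row in blue_positions: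
--             result[row][col] = 0
--
--         # Place them as far down as possible
--         for blue_row in blue_positions:
--             # Find the lowest available position
--             target_row = len(result) - 1
--             while target_row >= 0 and result[target_row][col] != 0:
--                 target_row -= 1
--
--             if target_row >= 0:
--                 result[target_row][col] = 1
--
--     return result
-- ===== SOURCE B (Python) =====
-- def _apply_move_down_rule(grid):
--     """Apply a 'move down' rule: per column, one bottom-up pass refilling the lowest empty cells."""
--     result = [row[:] for row in grid]
--     for c in range(len(result[0])):
--         col = [row[c] for row in result]
--         n = col.count(1)
--         cleared = [0 if v == 1 else v for v in col]
--         newcol_rev = []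
--         for v in reversed(cleared):
--             if n and v == 0:
--                 newcol_rev.append(1)
--                 n -= 1
--             else:
--                 newcol_rev.append(v)
--         h = len(result)
--         for r, row in enumerate(result):
--             row[c] = newcol_rev[h - 1 - r]
--     return result
-- ===== Notes on version B (the rewrite author's own statement) =====
-- stated objective: alternative
-- what changed: Instead of clearing blues and then re-scanning the column from the bottom once per blue cell, B extracts each column once, counts the blues, clears them, and refills the lowest n empty cells in a single bottom-up pass; it trades A's per-blue re-scan for per-column list passes of the same overall cost on typical grids.
import Mathlib
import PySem

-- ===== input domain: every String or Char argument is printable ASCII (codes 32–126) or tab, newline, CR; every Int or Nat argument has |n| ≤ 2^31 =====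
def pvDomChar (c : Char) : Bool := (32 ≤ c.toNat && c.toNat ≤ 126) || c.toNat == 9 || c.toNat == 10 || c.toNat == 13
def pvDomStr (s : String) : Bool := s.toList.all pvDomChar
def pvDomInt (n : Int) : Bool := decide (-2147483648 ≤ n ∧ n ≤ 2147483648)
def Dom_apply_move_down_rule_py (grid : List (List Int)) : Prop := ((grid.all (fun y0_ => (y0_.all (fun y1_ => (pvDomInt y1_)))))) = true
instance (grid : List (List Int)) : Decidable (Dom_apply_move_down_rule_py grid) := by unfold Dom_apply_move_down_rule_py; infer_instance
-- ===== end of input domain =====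

-- B replaces A's per-blue bottom-up re-scan of each column by a different per-column
-- algorithm: extract the column, count blues, clear them, refill the lowest n empty
-- cells in one bottom-up pass, and write the column back.

-- ===== PORT A =====
-- result[row][col] (indices are in range whenever A runs without raising)
def pvGetCell (g : List (List Int)) (r c : Nat) : Int := (g.getD r []).getD c 0

-- result[row][col] = v
def pvSetCell (g : List (List Int)) (r c : Nat) (v : Int) : List (List Int) :=
  g.modify r (fun row => row.set c v)

-- the 'while target_row >= 0 and result[target_row][col] != 0' scan, fuel = target_row+1
def findTargetA (g : List (List Int)) (c : Nat) : Nat → Option Nat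
  | 0 => none
  | t+1 => if pvGetCell g t c ≠ 0 then findTargetA g c t else some t

-- one iteration of the placement loop ('find the lowest available position, set it to 1')
def placeA (g : List (List Int)) (c : Nat) : List (List Int) :=
  match findTargetA g c g.length with
  | some t => pvSetCell g t c 1
  | none => g

-- one iteration of the outer 'for col in range(len(result[0]))' loop
def stepA (g : List (List Int)) (c : Nat) : List (List Int) :=
  let bluePos := (List.range g.length).filter (fun r => pvGetCell g r c == 1)
  let g1 := bluePos.foldl (fun acc r => pvSetCell acc r c 0) g
  bluePos.foldl (fun acc _ => placeA acc c) g1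

def apply_move_down_rule_py (grid : List (List Int)) : List (List Int) :=
  (List.range (grid.getD 0 []).length).foldl stepA grid

-- ===== PORT B =====
-- the bottom-up refill pass over the reversed cleared column ('if n and v == 0: …')
def fillB : Nat → List Int → List Int
  | 0, l => l
  | _+1, [] => []
  | n+1, v :: rest => if v = 0 then 1 :: fillB n rest else v :: fillB (n+1) rest

-- one column of B: extract, count blues, clear, refill bottom-up, write back
def stepB (g : List (List Int)) (c : Nat) : List (List Int) :=
  let col := g.map (fun row => row.getD c 0)
  let n := col.count 1
  let cleared := col.map (fun v => if v = 1 then 0 else v)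
  let newcol := (fillB n cleared.reverse).reverse
  g.mapIdx (fun r row => row.set c (newcol.getD r 0))

def apply_move_down_rule_py_alt (grid : List (List Int)) : List (List Int) :=
  (List.range (grid.getD 0 []).length).foldl stepB grid

-- ===== PRECONDITION & SPEC =====
-- A raises IndexError exactly on the empty grid (result[0]) and on grids where some row is
-- shorter than row 0 (result[row][col]); Pre_ excludes exactly those inputs.
def Pre_apply_move_down_rule_py (grid : List (List Int)) : Prop :=
  grid ≠ [] ∧ ∀ row ∈ grid, (grid.getD 0 []).length ≤ row.length
instance (grid : List (List Int)) : Decidable (Pre_apply_move_down_rule_py grid) := by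
  unfold Pre_apply_move_down_rule_py; infer_instance

def pvWitness_apply_move_down_rule_py : List (List Int) := [[1, 0], [0, 2], [1, 1]]

def Spec_apply_move_down_rule_py (grid : List (List Int)) (out : List (List Int)) : Prop := out = apply_move_down_rule_py_alt grid
instance (grid : List (List Int)) (out : List (List Int)) : Decidable (Spec_apply_move_down_rule_py grid out) := by unfold Spec_apply_move_down_rule_py; infer_instance

-- ===== CLAIM (what is proved, stated in full; the proofs are below) =====
def Claim_equal_apply_move_down_rule_py : Prop := ∀ (grid : List (List Int)), Dom_apply_move_down_rule_py grid → Pre_apply_move_down_rule_py grid → Spec_apply_move_down_rule_py grid (apply_move_down_rule_py grid)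

-- ===== LEMMAS AND PROOFS =====

-- 'write column c of g to be l' — the shape of B's write-back
def writeCol (g : List (List Int)) (c : Nat) (l : List Int) : List (List Int) :=
  g.mapIdx (fun r row => row.set c (l.getD r 0))

-- the column-scan of findTargetA, on the column list itself
def listFindL (l : List Int) : Nat → Option Nat
  | 0 => none
  | t+1 => if l.getD t 0 ≠ 0 then listFindL l t else some t

-- placeA on the column list
def placeL (l : List Int) : List Int :=
  match listFindL l l.length with
  | some t => l.set t 1
  | none => l

-- bottom-up placement on the reversed column
def placeR : List Int → List Int
  | [] => []
  | v :: rest => if v = 0 then 1 :: rest else v :: placeR rest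

theorem getD_set (l : List Int) (i j : Nat) (a d : Int) :
    (l.set i a).getD j d = if i = j ∧ i < l.length then a else l.getD j d := by
  by_cases h : i = j ∧ i < l.length
  · obtain ⟨h1, h2⟩ := h; subst h1
    rw [if_pos ⟨rfl, h2⟩, List.getD_eq_getElem?_getD, List.getElem?_set_self h2]; rfl
  · rw [if_neg h, List.getD_eq_getElem?_getD, List.getD_eq_getElem?_getD, List.getElem?_set]
    by_cases h1 : i = j
    · subst h1
      have h2 : ¬ i < l.length := fun hlt => h ⟨rfl, hlt⟩
      rw [if_pos rfl, if_neg h2, List.getElem?_eq_none (by omega)]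
    · rw [if_neg h1]

theorem writeCol_length (g : List (List Int)) (c : Nat) (l : List Int) :
    (writeCol g c l).length = g.length := by simp [writeCol]

theorem writeCol_getElem? (g : List (List Int)) (c : Nat) (l : List Int) (r : Nat) :
    (writeCol g c l)[r]? = (g[r]?).map (fun row => row.set c (l.getD r 0)) := by
  simp [writeCol]

theorem getD_writeCol (g : List (List Int)) (c : Nat) (l : List Int) (r : Nat)
    (hr : r < g.length) :
    (writeCol g c l).getD r [] = (g[r]).set c (l.getD r 0) := by
  rw [List.getD_eq_getElem?_getD, writeCol_getElem?, List.getElem?_eq_getElem hr]; rfl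

theorem pvGetCell_writeCol (g : List (List Int)) (c : Nat) (l : List Int)
    (hlen : l.length = g.length) (hc : ∀ row ∈ g, c < row.length) (r : Nat) :
    pvGetCell (writeCol g c l) r c = l.getD r 0 := by
  unfold pvGetCell
  by_cases hr : r < g.length
  · have hcr : c < (g[r]).length := hc _ (List.getElem_mem hr)
    rw [getD_writeCol g c l r hr, getD_set]
    simp [hcr]
  · have h1 : (writeCol g c l).getD r [] = [] := by
      rw [List.getD_eq_getElem?_getD, writeCol_getElem?,
          List.getElem?_eq_none (by omega)]; rfl
    rw [h1, List.getD_eq_default _ _ (by omega : l.length ≤ r)]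
    rfl

theorem pvSetCell_writeCol (g : List (List Int)) (c : Nat) (l : List Int)
    (hlen : l.length = g.length) (t : Nat) (v : Int) :
    pvSetCell (writeCol g c l) t c v = writeCol g c (l.set t v) := by
  apply List.ext_getElem?
  intro r
  unfold pvSetCell
  rw [List.getElem?_modify, writeCol_getElem?, writeCol_getElem?]
  cases hgr : g[r]? with
  | none => rfl
  | some row =>
    have hr : r < g.length := by
      by_contra hcon
      rw [List.getElem?_eq_none (by omega)] at hgr
      simp at hgr
    by_cases hrt : t = r
    · subst hrt
      simp only [Option.map_some, Option.map_eq_map]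
      rw [List.set_set, getD_set]
      simp [hlen, hr]
    · simp only [Option.map_some, Option.map_eq_map, Option.map_some, if_neg hrt]
      rw [getD_set]
      simp only [Option.some.injEq]
      rw [if_neg (fun h => hrt h.1)]

theorem writeCol_self (g : List (List Int)) (c : Nat) (hc : ∀ row ∈ g, c < row.length) :
    writeCol g c (g.map (fun row => row.getD c 0)) = g := by
  apply List.ext_getElem?
  intro r
  rw [writeCol_getElem?]
  by_cases hr : r < g.length
  · have hcr : c < (g[r]).length := hc _ (List.getElem_mem hr)
    rw [List.getElem?_eq_getElem hr]
    simp only [Option.map_some]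
    congr 1
    have h1 : (List.map (fun row => row.getD c 0) g).getD r 0 = (g[r]).getD c 0 := by
      rw [List.getD_eq_getElem _ 0 (by simpa using hr)]
      simp
    rw [h1, List.getD_eq_getElem _ 0 hcr]
    exact List.set_getElem_self hcr
  · rw [List.getElem?_eq_none (by omega)]
    simp

theorem findTargetA_writeCol (g : List (List Int)) (c : Nat) (l : List Int)
    (hlen : l.length = g.length) (hc : ∀ row ∈ g, c < row.length) (t : Nat) :
    findTargetA (writeCol g c l) c t = listFindL l t := by
  induction t with
  | zero => rfl
  | succ t ih =>
    unfold findTargetA listFindL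
    rw [pvGetCell_writeCol g c l hlen hc t, ih]

theorem placeL_length (l : List Int) : (placeL l).length = l.length := by
  unfold placeL
  cases listFindL l l.length <;> simp

theorem placeA_writeCol (g : List (List Int)) (c : Nat) (l : List Int)
    (hlen : l.length = g.length) (hc : ∀ row ∈ g, c < row.length) :
    placeA (writeCol g c l) c = writeCol g c (placeL l) := by
  unfold placeA placeL
  rw [writeCol_length, ← hlen, findTargetA_writeCol g c l hlen hc]
  cases listFindL l l.length with
  | none => rfl
  | some t => exact pvSetCell_writeCol g c l hlen t 1

theorem pvGetCell_eq_col (g : List (List Int)) (c r : Nat) :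
    pvGetCell g r c = (g.map (fun row => row.getD c 0)).getD r 0 := by
  unfold pvGetCell
  by_cases hr : r < g.length
  · have h1 : g.getD r [] = g[r] := List.getD_eq_getElem g [] hr
    have h2 : (g.map (fun row => row.getD c 0)).getD r 0 = (g[r]).getD c 0 := by
      rw [List.getD_eq_getElem _ 0 (by simpa using hr)]
      simp
    rw [h1, h2]
  · rw [List.getD_eq_default g [] (by omega),
        List.getD_eq_default (List.map (fun row => row.getD c 0) g) 0 (by simp; omega)]
    rfl

theorem clearFold_getElem? (ps : List Nat) (l : List Int) (j : Nat) :
    (ps.foldl (fun m r => m.set r 0) l)[j]? =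
      if j ∈ ps then l[j]?.map (fun _ => (0 : Int)) else l[j]? := by
  induction ps generalizing l with
  | nil => simp
  | cons p ps ih =>
    rw [List.foldl_cons, ih]
    by_cases hps : j ∈ ps
    · rw [if_pos hps, if_pos (by simp [hps]), List.getElem?_set]
      by_cases hpj : p = j
      · subst hpj
        by_cases hp : p < l.length
        · rw [List.getElem?_eq_getElem hp]; simp [hp]
        · rw [List.getElem?_eq_none (by omega)]; simp [hp]
      · simp [hpj]
    · by_cases hpj : p = j
      · subst hpj
        rw [if_neg hps, if_pos (by simp), List.getElem?_set]
        by_cases hp : p < l.length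
        · rw [List.getElem?_eq_getElem hp]; simp [hp]
        · rw [List.getElem?_eq_none (by omega)]; simp [hp]
      · rw [if_neg hps, if_neg (by simp [hps, Ne.symm, hpj]), List.getElem?_set_ne hpj]

theorem foldl_pvSet_writeCol (g : List (List Int)) (c : Nat)
    (_hc : ∀ row ∈ g, c < row.length) (ps : List Nat) :
    ∀ l : List Int, l.length = g.length →
      ps.foldl (fun acc r => pvSetCell acc r c 0) (writeCol g c l) =
        writeCol g c (ps.foldl (fun m r => m.set r 0) l) := by
  induction ps with
  | nil => intro l _; rfl
  | cons p ps ih =>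
    intro l hlen
    rw [List.foldl_cons, pvSetCell_writeCol g c l hlen p 0, List.foldl_cons]
    exact ih (l.set p 0) (by simpa using hlen)

theorem foldl_place_writeCol (g : List (List Int)) (c : Nat)
    (hc : ∀ row ∈ g, c < row.length) (ps : List Nat) :
    ∀ l : List Int, l.length = g.length →
      ps.foldl (fun acc _ => placeA acc c) (writeCol g c l) =
        writeCol g c (placeL^[ps.length] l) := by
  induction ps with
  | nil => intro l _; rfl
  | cons p ps ih =>
    intro l hlen
    rw [List.foldl_cons, placeA_writeCol g c l hlen hc,
        ih (placeL l) (by rw [placeL_length]; exact hlen), List.length_cons,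
        ← Function.iterate_succ_apply]

theorem listFindL_lt (l : List Int) (t : Nat) (j : Nat) (h : listFindL l t = some j) : j < t := by
  induction t with
  | zero => simp [listFindL] at h
  | succ t ih =>
    unfold listFindL at h
    split_ifs at h with h0
    · exact Nat.lt_succ_of_lt (ih h)
    · cases h; omega

theorem listFindL_append (l : List Int) (a : Int) (t : Nat) (ht : t ≤ l.length) :
    listFindL (l ++ [a]) t = listFindL l t := by
  induction t with
  | zero => rfl
  | succ t ih =>
    unfold listFindL
    rw [List.getD_append l [a] 0 t (by omega), ih (by omega)]

theorem placeL_rev (l : List Int) : placeL l = (placeR l.reverse).reverse := by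
  induction l using List.reverseRecOn with
  | nil => rfl
  | append_singleton l a ih =>
    unfold placeL
    have hlen : (l ++ [a]).length = l.length + 1 := by simp
    rw [hlen]
    unfold listFindL
    have hget : (l ++ [a]).getD l.length 0 = a := by
      rw [List.getD_eq_getElem?_getD, List.getElem?_concat_length]; rfl
    rw [hget]
    by_cases ha : a = 0
    · subst ha
      simp only [ne_eq, not_true_eq_false, if_false]
      rw [List.set_append_right _ _ (le_refl _)]
      simp [placeR]
    · rw [if_pos ha, listFindL_append l a l.length (le_refl _)]
      have hrev : (placeR ((l ++ [a]).reverse)).reverse = placeL l ++ [a] := by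
        rw [List.reverse_append]
        simp only [List.reverse_singleton, List.singleton_append, placeR, if_neg ha]
        rw [List.reverse_cons, ← ih]
      rw [hrev]
      unfold placeL
      cases hfind : listFindL l l.length with
      | none => rfl
      | some t =>
        have ht : t < l.length := listFindL_lt l l.length t hfind
        show (l ++ [a]).set t 1 = l.set t 1 ++ [a]
        exact List.set_append_left t 1 ht

theorem fillB_zero (l : List Int) : fillB 0 l = l := by cases l <;> rfl

theorem fillB_place (r : List Int) : ∀ n : Nat, fillB (n+1) r = fillB n (placeR r) := by
  induction r with
  | nil => intro n; cases n <;> rfl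
  | cons v rest ih =>
    intro n
    by_cases hv : v = 0
    · subst hv
      cases n with
      | zero => simp [fillB, placeR]
      | succ m => simp [fillB, placeR]
    · cases n with
      | zero =>
        simp only [fillB, if_neg hv, placeR]
        rw [ih 0]
        simp [fillB_zero]
      | succ m =>
        simp only [fillB, if_neg hv, placeR]
        rw [ih (m+1)]

theorem placeL_iterate (n : Nat) : ∀ m : List Int, placeL^[n] m = (fillB n m.reverse).reverse := by
  induction n with
  | zero => intro m; simp [fillB_zero]
  | succ n ih =>
    intro m
    rw [Function.iterate_succ_apply, ih (placeL m)]
    have h1 : (placeL m).reverse = placeR m.reverse := by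
      rw [placeL_rev, List.reverse_reverse]
    rw [h1, ← fillB_place]

theorem map_getD_range (l : List Int) :
    (List.range l.length).map (fun r => l.getD r 0) = l := by
  apply List.ext_getElem (by simp)
  intro i h1 h2
  simp only [List.getElem_map, List.getElem_range]
  exact List.getD_eq_getElem l 0 h2

theorem bluePos_length (g : List (List Int)) (c : Nat) :
    ((List.range g.length).filter (fun r => pvGetCell g r c == 1)).length =
      ((g.map (fun row => row.getD c 0)).count 1) := by
  have hfun : (fun r => pvGetCell g r c == 1) =
      (fun r => (g.map (fun row => row.getD c 0)).getD r 0 == 1) := by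
    funext r; rw [pvGetCell_eq_col]
  rw [hfun, ← List.countP_eq_length_filter]
  have hlen : g.length = (g.map (fun row => row.getD c 0)).length := by simp
  rw [hlen]
  set col := g.map (fun row => row.getD c 0) with hcol
  rw [show (fun r => col.getD r 0 == 1) = ((fun v => v == (1:Int)) ∘ (fun r => col.getD r 0)) from rfl,
      ← List.countP_map, map_getD_range col]
  rfl

theorem mem_bluePos (g : List (List Int)) (c : Nat) (j : Nat) :
    (j ∈ (List.range g.length).filter (fun r => pvGetCell g r c == 1)) ↔
      ((g.map (fun row => row.getD c 0))[j]? = some 1) := by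
  rw [List.mem_filter, List.mem_range]
  constructor
  · rintro ⟨hj, hp⟩
    have hj' : j < (g.map (fun row => row.getD c 0)).length := by simpa using hj
    rw [List.getElem?_eq_getElem hj']
    have h1 := pvGetCell_eq_col g c j
    rw [List.getD_eq_getElem _ 0 hj'] at h1
    simp only [beq_iff_eq] at hp
    rw [← h1, hp]
  · intro hsome
    have hj' : j < (g.map (fun row => row.getD c 0)).length := by
      by_contra hcon
      rw [List.getElem?_eq_none (by omega)] at hsome
      simp at hsome
    rw [List.getElem?_eq_getElem hj'] at hsome
    have hv := Option.some.inj hsome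
    refine ⟨by simpa using hj', ?_⟩
    simp only [beq_iff_eq]
    rw [pvGetCell_eq_col, List.getD_eq_getElem _ 0 hj', hv]

theorem clearFold_eq_map (g : List (List Int)) (c : Nat) :
    ((List.range g.length).filter (fun r => pvGetCell g r c == 1)).foldl
        (fun m r => m.set r 0) (g.map (fun row => row.getD c 0)) =
      (g.map (fun row => row.getD c 0)).map (fun v => if v = 1 then 0 else v) := by
  apply List.ext_getElem?
  intro j
  rw [clearFold_getElem?]
  cases hcj : (g.map (fun row => row.getD c 0))[j]? with
  | none =>
    rw [if_neg (fun hin => by rw [(mem_bluePos g c j).mp hin] at hcj; simp at hcj)]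
    simp only [List.getElem?_map] at hcj ⊢
    rw [hcj]
    rfl
  | some v =>
    by_cases hv : v = 1
    · subst hv
      rw [if_pos ((mem_bluePos g c j).mpr hcj)]
      simp only [List.getElem?_map] at hcj ⊢
      rw [hcj]
      simp
    · rw [if_neg (fun hin => by
          rw [(mem_bluePos g c j).mp hin] at hcj
          exact hv (Option.some.inj hcj).symm)]
      simp only [List.getElem?_map] at hcj ⊢
      rw [hcj]
      simp [hv]

theorem stepA_eq_stepB (g : List (List Int)) (c : Nat) (hc : ∀ row ∈ g, c < row.length) :
    stepA g c = stepB g c := by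
  unfold stepA stepB
  simp only []
  set col := g.map (fun row => row.getD c 0) with hcol
  have hlen : col.length = g.length := by simp [hcol]
  set bp := (List.range g.length).filter (fun r => pvGetCell g r c == 1) with hbp
  have h0 : g = writeCol g c col := (writeCol_self g c hc).symm
  conv_lhs => rw [h0]
  rw [foldl_pvSet_writeCol g c hc bp col hlen]
  rw [clearFold_eq_map g c]
  set cleared := col.map (fun v => if v = 1 then 0 else v) with hcleared
  have hclen : cleared.length = g.length := by simp [hcleared, hlen]
  rw [foldl_place_writeCol g c hc bp cleared hclen]
  rw [placeL_iterate bp.length cleared, bluePos_length g c]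
  rfl

theorem stepB_rowlen (g : List (List Int)) (c : Nat) (w : Nat)
    (h : ∀ row ∈ g, w ≤ row.length) : ∀ row ∈ stepB g c, w ≤ row.length := by
  intro row hrow
  unfold stepB at hrow
  simp only [List.mem_mapIdx] at hrow
  obtain ⟨i, hi, hrow⟩ := hrow
  rw [← hrow]
  simpa using h _ (List.getElem_mem hi)

theorem foldl_cols (w : Nat) (cs : List Nat) :
    ∀ g : List (List Int), (∀ c ∈ cs, c < w) → (∀ row ∈ g, w ≤ row.length) →
      cs.foldl stepA g = cs.foldl stepB g := by
  induction cs with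
  | nil => intro g _ _; rfl
  | cons c cs ih =>
    intro g hcs hg
    rw [List.foldl_cons, List.foldl_cons]
    have hc : ∀ row ∈ g, c < row.length := fun row hr =>
      Nat.lt_of_lt_of_le (hcs c (by simp)) (hg row hr)
    rw [stepA_eq_stepB g c hc]
    exact ih (stepB g c) (fun c' hc' => hcs c' (by simp [hc']))
      (stepB_rowlen g c w hg)

theorem apply_move_down_rule_py_spec' (grid : List (List Int))
    (h : ∀ row ∈ grid, (grid.getD 0 []).length ≤ row.length) :
    apply_move_down_rule_py grid = apply_move_down_rule_py_alt grid := by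
  unfold apply_move_down_rule_py apply_move_down_rule_py_alt
  exact foldl_cols (grid.getD 0 []).length _ grid
    (fun c hc => List.mem_range.mp hc) h

-- ===== VERDICT (by name: the statement is the Claim_ definition above) =====
theorem apply_move_down_rule_py_spec : Claim_equal_apply_move_down_rule_py := by
  intro grid _ hpre
  exact apply_move_down_rule_py_spec' grid hpre.2
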